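-- pv_equiv track=rewrite | github.com/BiomedSciAI/fuse-med-ml | fuse_examples/multimodality/ehr_transformer/utils.py | position_idx
-- ===== SOURCE A (Python) =====
-- from collections.abc import Sequence
--
-- special_tokens = {
--     "padding": "PAD",
--     "unknown": "UNK",
--     "separator": "SEP",
--     "cls": "CLS",
--     "separator_static": "SEP_STATIC",
-- }
--
-- def position_idx(
--     tokens: Sequence[str], symbol: str = special_tokens["separator"]
-- ) -> list[int]:
--     """
--     Given a sequence of codes divided into groups (visits)
--      by symbol ('SEP') tokens, returns a sequence of the same
--      size of visit indices.
--     :param tokens: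
--     :param symbol:
--     :return:
--     """
--     group_inds = []
--     flag = 0
--     for token in tokens:
--         group_inds.append(flag)
--         if token == symbol:
--             flag += 1
--     return group_inds
-- ===== SOURCE B (Python) =====
-- def position_idx(tokens, symbol="SEP"):
--     # Run-length construction: repeatedly locate the next separator and emit
--     # the whole group as a repeated block, instead of a per-token counter loop.
--     out = []
--     g = 0
--     rest = list(tokens)
--     while symbol in rest:
--         k = rest.index(symbol)
--         out += [g] * (k + 1)
--         rest = rest[k + 1:]
--         g += 1
--     out += [g] * len(rest)
--     return out
-- ===== Notes on version B (the rewrite author's own statement) =====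
-- stated objective: alternative
-- what changed: Replaces the per-token running-counter loop with run-length construction: repeatedly search for the next separator with list.index and emit each visit group as a repeated block [g]*(k+1), then the tail block.
import Mathlib
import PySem

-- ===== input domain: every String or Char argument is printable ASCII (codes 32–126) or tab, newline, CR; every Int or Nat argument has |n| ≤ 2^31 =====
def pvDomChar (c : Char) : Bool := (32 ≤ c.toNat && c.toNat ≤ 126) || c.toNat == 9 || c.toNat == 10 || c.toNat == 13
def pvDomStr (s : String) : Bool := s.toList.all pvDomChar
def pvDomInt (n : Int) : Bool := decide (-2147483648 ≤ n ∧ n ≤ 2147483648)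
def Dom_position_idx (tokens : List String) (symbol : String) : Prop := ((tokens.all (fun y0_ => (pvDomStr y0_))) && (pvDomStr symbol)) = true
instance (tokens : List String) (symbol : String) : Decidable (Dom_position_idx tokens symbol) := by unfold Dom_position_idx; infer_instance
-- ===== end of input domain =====

-- B builds the output by run-length blocks between separators instead of A's per-token counter loop (objective: alternative, same cost).

-- ===== PORT A =====
-- A: running counter; append current flag, then increment when token == symbol.
def position_idx (tokens : List String) (symbol : String) : List Int :=
  (tokens.foldl
    (fun (st : List Int × Int) token =>
      (st.1 ++ [st.2], if token == symbol then st.2 + 1 else st.2))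
    ([], 0)).1

-- ===== PORT B =====
-- B: while the symbol occurs in the remaining list, find its index k, emit [g]*(k+1),
-- drop the consumed prefix and continue with g+1; finally emit [g]*len(rest).
def pvAltGo (symbol : String) (rest : List String) (g : Int) : List Int :=
  match h : PySem.List.index? rest symbol with
  | some k => List.replicate (k + 1) g ++ pvAltGo symbol (rest.drop (k + 1)) (g + 1)
  | none => List.replicate rest.length g
termination_by rest.length
decreasing_by
  obtain ⟨hk, _, _⟩ := PySem.List.getElem_of_index?_eq_some h
  simp only [List.length_drop]
  omega

def position_idx_alt (tokens : List String) (symbol : String) : List Int :=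
  pvAltGo symbol tokens 0

-- ===== PRECONDITION & SPEC =====
def Spec_position_idx (tokens : List String) (symbol : String) (out : List Int) : Prop := out = position_idx_alt tokens symbol
instance (tokens : List String) (symbol : String) (out : List Int) : Decidable (Spec_position_idx tokens symbol out) := by unfold Spec_position_idx; infer_instance

-- ===== CLAIM (what is proved, stated in full; the proofs are below) =====
def Claim_equal_position_idx : Prop := ∀ (tokens : List String) (symbol : String), Dom_position_idx tokens symbol → Spec_position_idx tokens symbol (position_idx tokens symbol)

-- ===== LEMMAS AND PROOFS =====
theorem pvAltGo_cons (symbol t : String) (ts : List String) (g : Int) :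
    pvAltGo symbol (t :: ts) g
      = g :: pvAltGo symbol ts (if t == symbol then g + 1 else g) := by
  by_cases ht : t = symbol
  · subst ht
    rw [pvAltGo, PySem.List.index?_cons_self]
    simp
  · rw [pvAltGo, PySem.List.index?_cons_of_ne ts ht]
    cases hk : PySem.List.index? ts symbol with
    | none =>
      rw [pvAltGo, hk]
      simp [ht, List.replicate_succ]
    | some k =>
      conv_rhs => rw [pvAltGo, hk]
      simp [ht, List.replicate_succ]

theorem pv_fold_go (symbol : String) (tokens : List String) :
    ∀ (acc : List Int) (g : Int),
      (tokens.foldl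
        (fun (st : List Int × Int) token =>
          (st.1 ++ [st.2], if token == symbol then st.2 + 1 else st.2))
        (acc, g)).1
      = acc ++ pvAltGo symbol tokens g := by
  induction tokens with
  | nil =>
    intro acc g
    rw [pvAltGo]
    simp
  | cons t ts ih =>
    intro acc g
    rw [pvAltGo_cons]
    simp only [List.foldl_cons]
    rw [ih]
    by_cases h : t == symbol <;> simp [h, List.append_assoc]

-- ===== VERDICT (by name: the statement is the Claim_ definition above) =====
theorem position_idx_spec : Claim_equal_position_idx := by
  intro tokens symbol _
  unfold Spec_position_idx position_idx position_idx_alt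
  simpa using pv_fold_go symbol tokens [] 0
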